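-- pv_equiv track=rewrite | github.com/Gappu824/Bajaj-HachRX_Hustlers | app/core/enhanced_rag_pipeline.py | _create_chunk_mapping
-- ===== SOURCE A (Python) =====
-- from typing import List, Tuple, Dict, Optional, Any
--
-- def _create_chunk_mapping(small_chunks: List[str], large_chunks: List[str],
--                             full_text: str) -> Dict[int, int]:
--     """Map small chunks to their corresponding large chunks"""
--     mapping = {}
--
--     for i, small_chunk in enumerate(small_chunks):
--         # Find which large chunk contains this small chunk
--         small_start = full_text.find(small_chunk[:50])  # Use first 50 chars to locate
--
--         for j, large_chunk in enumerate(large_chunks):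
--             large_start = full_text.find(large_chunk[:50])
--             large_end = large_start + len(large_chunk)
--
--             if large_start <= small_start < large_end:
--                 mapping[i] = j
--                 break
--
--     return mapping
-- ===== SOURCE B (Python) =====
-- def _create_chunk_mapping(small_chunks, large_chunks, full_text):
--     """Map small chunks to their corresponding large chunks"""
--     # Transposed sweep: walk the large chunks from last to first and stamp each
--     # one's index onto every small chunk it contains; a later (smaller-index)
--     # stamp overwrites an earlier one, so each small chunk ends up with its
--     # first containing large chunk -- without re-running find per pair.
--     positions = [full_text.find(c[:50]) for c in small_chunks]
--     best = [None] * len(small_chunks)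
--     for j, large_chunk in reversed(list(enumerate(large_chunks))):
--         s = full_text.find(large_chunk[:50])
--         e = s + len(large_chunk)
--         best = [j if s <= p < e else b for p, b in zip(positions, best)]
--     return {i: j for i, j in enumerate(best) if j is not None}
-- ===== Notes on version B (the rewrite author's own statement) =====
-- stated objective: faster
-- what changed: B inverts the loop nest: it walks the large chunks once from last to first, stamping each index onto every small chunk whose precomputed position it contains (smaller indices overwrite), instead of A's per-small-chunk inner scan that re-runs full_text.find for every (small, large) pair.
import Mathlib
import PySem

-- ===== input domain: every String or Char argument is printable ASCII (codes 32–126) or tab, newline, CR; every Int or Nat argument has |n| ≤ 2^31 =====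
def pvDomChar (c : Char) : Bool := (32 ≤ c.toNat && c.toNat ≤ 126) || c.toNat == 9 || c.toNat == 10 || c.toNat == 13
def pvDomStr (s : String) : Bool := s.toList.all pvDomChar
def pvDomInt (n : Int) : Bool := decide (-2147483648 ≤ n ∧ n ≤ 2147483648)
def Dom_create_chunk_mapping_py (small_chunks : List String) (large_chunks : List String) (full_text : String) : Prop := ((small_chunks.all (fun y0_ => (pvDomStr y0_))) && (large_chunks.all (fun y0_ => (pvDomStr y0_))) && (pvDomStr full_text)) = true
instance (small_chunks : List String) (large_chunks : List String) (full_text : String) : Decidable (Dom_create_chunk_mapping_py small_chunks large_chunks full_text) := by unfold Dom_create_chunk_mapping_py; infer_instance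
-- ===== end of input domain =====

-- B inverts A's loop nest: one reversed pass over the large chunks stamps indices onto the
-- small chunks they contain (smaller indices overwrite), removing the per-pair find calls.

-- ===== PORT A =====
-- inner 'for j, large_chunk in enumerate(large_chunks): … break' loop of A
def pvInnerA (full_text : String) (small_start : Int) (i : Int)
    (mapping : PySem.Dict Int Int) : List (Int × String) → PySem.Dict Int Int
  | [] => mapping
  | (j, large_chunk) :: rest =>
    let large_start := PySem.Str.find full_text (PySem.Str.slice large_chunk none (some 50))
    let large_end := large_start + (PySem.Str.len large_chunk : Int)
    if large_start ≤ small_start ∧ small_start < large_end then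
      mapping.insert i j
    else
      pvInnerA full_text small_start i mapping rest

def create_chunk_mapping_py (small_chunks : List String) (large_chunks : List String) (full_text : String) : List (Int × Int) :=
  ((PySem.List.enumerate small_chunks 0).foldl (fun mapping p =>
      let small_start := PySem.Str.find full_text (PySem.Str.slice p.2 none (some 50))
      pvInnerA full_text small_start p.1 mapping (PySem.List.enumerate large_chunks 0))
    PySem.Dict.empty).items

-- ===== PORT B =====
def create_chunk_mapping_py_alt (small_chunks : List String) (large_chunks : List String) (full_text : String) : List (Int × Int) :=
  let positions := small_chunks.map (fun c => PySem.Str.find full_text (PySem.Str.slice c none (some 50)))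
  let best := (PySem.List.enumerate large_chunks 0).reverse.foldl
    (fun b q =>
      let s := PySem.Str.find full_text (PySem.Str.slice q.2 none (some 50))
      let e := s + (PySem.Str.len q.2 : Int)
      List.zipWith (fun p bi => if s ≤ p ∧ p < e then some q.1 else bi) positions b)
    (List.replicate small_chunks.length (none : Option Int))
  ((PySem.List.enumerate best 0).foldl
      (fun d p => match p.2 with | some j => d.insert p.1 j | none => d)
      PySem.Dict.empty).items

-- ===== PRECONDITION & SPEC =====
def Spec_create_chunk_mapping_py (small_chunks : List String) (large_chunks : List String) (full_text : String) (out : List (Int × Int)) : Prop := out = create_chunk_mapping_py_alt small_chunks large_chunks full_text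
instance (small_chunks : List String) (large_chunks : List String) (full_text : String) (out : List (Int × Int)) : Decidable (Spec_create_chunk_mapping_py small_chunks large_chunks full_text out) := by unfold Spec_create_chunk_mapping_py; infer_instance

-- ===== CLAIM (what is proved, stated in full; the proofs are below) =====
def Claim_equal_create_chunk_mapping_py : Prop := ∀ (small_chunks : List String) (large_chunks : List String) (full_text : String), Dom_create_chunk_mapping_py small_chunks large_chunks full_text → Spec_create_chunk_mapping_py small_chunks large_chunks full_text (create_chunk_mapping_py small_chunks large_chunks full_text)

-- ===== LEMMAS AND PROOFS =====
-- the containment test both programs apply to an enumerated large chunk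
def pvPred (ft : String) (p : Int) (q : Int × String) : Bool :=
  let s := PySem.Str.find ft (PySem.Str.slice q.2 none (some 50))
  decide (s ≤ p) && decide (p < s + (PySem.Str.len q.2 : Int))

-- A's inner break-loop is the first match of pvPred
lemma pvInnerA_eq (ft : String) (ss i : Int) (m : PySem.Dict Int Int) (e : List (Int × String)) :
    pvInnerA ft ss i m e =
      match e.find? (pvPred ft ss) with
      | some q => m.insert i q.1
      | none => m := by
  induction e with
  | nil => simp [pvInnerA]
  | cons q rest ih =>
    rw [pvInnerA, List.find?_cons]
    by_cases h : PySem.Str.find ft (PySem.Str.slice q.2 none (some 50)) ≤ ss ∧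
        ss < PySem.Str.find ft (PySem.Str.slice q.2 none (some 50)) + (PySem.Str.len q.2 : Int)
    · have hb : pvPred ft ss q = true := by
        simp only [pvPred, Bool.and_eq_true, decide_eq_true_eq]; exact h
      simp only [if_pos h, hb]
    · have hb : pvPred ft ss q = false := by
        simp only [pvPred, Bool.and_eq_false_iff, decide_eq_false_iff_not]
        by_cases h1 : PySem.Str.find ft (PySem.Str.slice q.2 none (some 50)) ≤ ss
        · exact Or.inr (fun h2 => h ⟨h1, h2⟩)
        · exact Or.inl h1
      simp only [if_neg h, hb, ih]

lemma pvZipFuse {α β γ δ : Type} (f : α → γ → δ) (g : α → β → γ) (ps : List α) (b0 : List β) :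
    List.zipWith f ps (List.zipWith g ps b0) = List.zipWith (fun p b => f p (g p b)) ps b0 := by
  induction ps generalizing b0 with
  | nil => simp
  | cons p ps ih => cases b0 <;> simp [ih]

lemma pvZipSnd {α β : Type} (ps : List α) (b0 : List β) (h : ps.length = b0.length) :
    List.zipWith (fun _ b => b) ps b0 = b0 := by
  induction ps generalizing b0 with
  | nil => cases b0 <;> simp_all
  | cons p ps ih => cases b0 with
    | nil => simp at h
    | cons b bs => simp only [List.zipWith]; rw [ih bs (by simpa using h)]

lemma pvZipReplicate {α β : Type} (f : α → Option β → Option β) (ps : List α) :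
    List.zipWith f ps (List.replicate ps.length none) = ps.map (fun p => f p none) := by
  induction ps with
  | nil => simp
  | cons p ps ih => simp [List.replicate, ih]

-- B's reversed overwrite sweep computes, per position, the first pvPred match
lemma pvSweep_eq (ft : String) (e : List (Int × String)) (ps : List Int) (b0 : List (Option Int))
    (h : ps.length = b0.length) :
    e.reverse.foldl
      (fun b q =>
        let s := PySem.Str.find ft (PySem.Str.slice q.2 none (some 50))
        let en := s + (PySem.Str.len q.2 : Int)
        List.zipWith (fun p bi => if s ≤ p ∧ p < en then some q.1 else bi) ps b) b0
    = List.zipWith (fun p bi =>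
        match e.find? (pvPred ft p) with
        | some q => some q.1
        | none => bi) ps b0 := by
  rw [List.foldl_reverse]
  induction e with
  | nil => simpa using (pvZipSnd ps b0 h).symm
  | cons q rest ih =>
    rw [List.foldr_cons, ih]
    rw [pvZipFuse]
    congr 1
    funext p bi
    rw [List.find?_cons]
    by_cases hp : pvPred ft p q = true
    · have h2 : PySem.Str.find ft (PySem.Str.slice q.2 none (some 50)) ≤ p ∧
          p < PySem.Str.find ft (PySem.Str.slice q.2 none (some 50)) + (PySem.Str.len q.2 : Int) := by
        simpa [pvPred] using hp
      simp only [hp, if_pos h2]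
    · have h2 : ¬ (PySem.Str.find ft (PySem.Str.slice q.2 none (some 50)) ≤ p ∧
          p < PySem.Str.find ft (PySem.Str.slice q.2 none (some 50)) + (PySem.Str.len q.2 : Int)) := by
        simpa [pvPred] using hp
      simp only [Bool.not_eq_true] at hp
      simp only [hp, if_neg h2]

lemma pvEnumerateMap {α β : Type} (g : α → β) (xs : List α) (k : Int) :
    PySem.List.enumerate (xs.map g) k = (PySem.List.enumerate xs k).map (fun p => (p.1, g p.2)) := by
  induction xs generalizing k with
  | nil => simp [PySem.List.enumerate_nil]
  | cons x xs ih => simp [PySem.List.enumerate_cons, ih]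

-- ===== VERDICT (by name: the statement is the Claim_ definition above) =====
theorem create_chunk_mapping_py_spec : Claim_equal_create_chunk_mapping_py := by
  intro sc lcs ft _
  unfold Spec_create_chunk_mapping_py create_chunk_mapping_py create_chunk_mapping_py_alt
  simp only []
  rw [pvSweep_eq ft (PySem.List.enumerate lcs 0)
        (sc.map (fun c => PySem.Str.find ft (PySem.Str.slice c none (some 50))))
        (List.replicate sc.length none) (by simp)]
  rw [show List.replicate sc.length (none : Option Int)
        = List.replicate (sc.map (fun c => PySem.Str.find ft (PySem.Str.slice c none (some 50)))).length none by simp]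
  rw [pvZipReplicate, List.map_map, pvEnumerateMap, List.foldl_map]
  congr 1
  apply PySem.List.foldl_congr_mem
  intro m p _
  rw [pvInnerA_eq]
  simp only [Function.comp]
  cases h : (PySem.List.enumerate lcs 0).find?
      (pvPred ft (PySem.Str.find ft (PySem.Str.slice p.2 none (some 50)))) <;> rfl
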